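-- pv_equiv track=rewrite | github.com/o4dvasq/arec-morning-briefing | sources/memory_reader.py | _extract_open_tasks
-- ===== SOURCE A (Python) =====
-- def _extract_open_tasks(tasks_md: str) -> dict[str, list[str]]:
--     """Parse TASKS.md, return open tasks grouped by section. Stop at Done."""
--     categories = {}
--     current_category = "General"
--     for line in tasks_md.splitlines():
--         if line.startswith("## "):
--             current_category = line.lstrip("# ").strip()
--             if current_category.lower() == "done":
--                 break
--             continue
--         if line.strip().startswith("- [ ]"):
--             task = line.strip()[6:].strip()
--             task = task.replace("_(their action)_", "[THEIR ACTION]")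
--             task = task.replace("_(Tony action)_", "[TONY'S ACTION]")
--             categories.setdefault(current_category, []).append(task)
--     return categories
-- ===== SOURCE B (Python) =====
-- def _split_sections(lines):
--     """Phase 1: ordered (name, body_lines) sections; implicit leading 'General';
--     stop (after recording the current section) when a 'Done' header is met."""
--     sections = []
--     name, body = "General", []
--     for line in lines:
--         if line.startswith("## "):
--             sections.append((name, body))
--             new_name = line.lstrip("# ").strip()
--             if new_name.lower() == "done":
--                 return sections
--             name, body = new_name, []
--         else:
--             body.append(line)
--     sections.append((name, body))
--     return sections
--
--
-- def _extract_open_tasks(tasks_md: str) -> dict[str, list[str]]: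
--     """Parse TASKS.md, return open tasks grouped by section. Stop at Done."""
--     categories = {}
--     for name, body in _split_sections(tasks_md.splitlines()):
--         for line in body:
--             if line.strip().startswith("- [ ]"):
--                 task = line.strip()[6:].strip()
--                 task = task.replace("_(their action)_", "[THEIR ACTION]")
--                 task = task.replace("_(Tony action)_", "[TONY'S ACTION]")
--                 categories.setdefault(name, []).append(task)
--     return categories
-- ===== Notes on version B (the rewrite author's own statement) =====
-- stated objective: alternative
-- what changed: Replaces A's single loop with mutable current_category state by a two-phase decomposition: first split the lines into an ordered (section name, body lines) list (implicit General head, stopping at a Done header), then harvest the open-checkbox tasks section by section into the dict.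
import Mathlib
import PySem

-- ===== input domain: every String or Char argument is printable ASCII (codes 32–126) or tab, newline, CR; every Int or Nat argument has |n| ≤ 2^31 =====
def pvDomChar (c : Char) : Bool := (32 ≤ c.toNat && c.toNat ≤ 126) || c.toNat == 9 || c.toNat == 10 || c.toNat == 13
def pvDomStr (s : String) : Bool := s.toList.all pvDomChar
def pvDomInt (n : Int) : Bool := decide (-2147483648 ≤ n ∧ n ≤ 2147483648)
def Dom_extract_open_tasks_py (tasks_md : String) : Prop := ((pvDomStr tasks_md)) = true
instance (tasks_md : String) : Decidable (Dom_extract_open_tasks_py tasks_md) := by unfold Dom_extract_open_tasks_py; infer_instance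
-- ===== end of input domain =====

-- B re-decomposes A's single stateful loop into two phases (split into sections, then harvest open tasks per section); objective: alternative decomposition, same cost. Return-value equivalence only (neither program mutates its argument).

-- ===== PORT A =====

-- line.lstrip("# "): drop leading '#' and ' ' characters (exact port of str.lstrip with a char set)
def pyLstripHashSpace (s : String) : String :=
  String.ofList (s.toList.dropWhile (fun c => c == '#' || c == ' '))

-- the task-text computation shared verbatim by both Pythons (strip()[6:].strip() + two replaces)
def pyTaskText (line : String) : String :=
  let task := PySem.Str.strip (PySem.Str.slice (PySem.Str.strip line) (some 6) none)
  let task := PySem.Str.replace task "_(their action)_" "[THEIR ACTION]"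
  PySem.Str.replace task "_(Tony action)_" "[TONY'S ACTION]"

-- A's loop over the lines, state = (categories, current_category); 'break' returns the dict
def pvALoop : List String → PySem.Dict String (List String) → String → PySem.Dict String (List String)
  | [], cats, _ => cats
  | l :: ls, cats, cur =>
    if PySem.Str.startswith l "## " then
      let c := PySem.Str.strip (pyLstripHashSpace l)
      if PySem.Str.lower c == "done" then cats
      else pvALoop ls cats c
    else if PySem.Str.startswith (PySem.Str.strip l) "- [ ]" then
      pvALoop ls (cats.modify cur [] (· ++ [pyTaskText l])) cur
    else pvALoop ls cats cur

def extract_open_tasks_py (tasks_md : String) : List (String × List String) :=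
  (pvALoop (PySem.Str.splitlines tasks_md) PySem.Dict.empty "General").items

-- ===== PORT B =====

-- phase 1 (_split_sections): ordered (name, body) list; implicit 'General'; stop at a Done header
def pvSplitSections : List String → String → List String → List (String × List String)
  | [], name, body => [(name, body)]
  | l :: ls, name, body =>
    if PySem.Str.startswith l "## " then
      let newName := PySem.Str.strip (pyLstripHashSpace l)
      if PySem.Str.lower newName == "done" then [(name, body)]
      else (name, body) :: pvSplitSections ls newName []
    else pvSplitSections ls name (body ++ [l])

-- phase 2 inner step: one body line of section `name`
def pvBStep (name : String) (cats : PySem.Dict String (List String)) (l : String) :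
    PySem.Dict String (List String) :=
  if PySem.Str.startswith (PySem.Str.strip l) "- [ ]" then
    cats.modify name [] (· ++ [pyTaskText l])
  else cats

def extract_open_tasks_py_alt (tasks_md : String) : List (String × List String) :=
  ((pvSplitSections (PySem.Str.splitlines tasks_md) "General" []).foldl
    (fun cats sec => sec.2.foldl (pvBStep sec.1) cats) PySem.Dict.empty).items

-- ===== PRECONDITION & SPEC =====
def Spec_extract_open_tasks_py (tasks_md : String) (out : List (String × List String)) : Prop := out = extract_open_tasks_py_alt tasks_md
instance (tasks_md : String) (out : List (String × List String)) : Decidable (Spec_extract_open_tasks_py tasks_md out) := by unfold Spec_extract_open_tasks_py; infer_instance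

-- ===== CLAIM (what is proved, stated in full; the proofs are below) =====
def Claim_equal_extract_open_tasks_py : Prop := ∀ (tasks_md : String), Dom_extract_open_tasks_py tasks_md → Spec_extract_open_tasks_py tasks_md (extract_open_tasks_py tasks_md)

-- ===== LEMMAS AND PROOFS =====

-- folding B's two phases from any accumulated body equals resuming A's loop after that body
theorem pvSections_fold_eq_aLoop (ls : List String) :
    ∀ (cur : String) (body : List String) (cats : PySem.Dict String (List String)),
    (pvSplitSections ls cur body).foldl
        (fun cats sec => sec.2.foldl (pvBStep sec.1) cats) cats
      = pvALoop ls (body.foldl (pvBStep cur) cats) cur := by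
  induction ls with
  | nil => intro cur body cats; simp [pvSplitSections, pvALoop]
  | cons l ls ih =>
    intro cur body cats
    by_cases h1 : PySem.Str.startswith l "## " = true
    · by_cases h2 : (PySem.Str.lower (PySem.Str.strip (pyLstripHashSpace l)) == "done") = true
      · simp only [pvSplitSections, pvALoop, if_pos h1, if_pos h2, List.foldl_cons,
          List.foldl_nil]
      · simp only [pvSplitSections, pvALoop, if_pos h1, if_neg h2, List.foldl_cons]
        rw [ih]
        simp only [List.foldl_nil]
    · simp only [pvSplitSections, pvALoop, if_neg h1]
      rw [ih, List.foldl_append, List.foldl_cons, List.foldl_nil]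
      by_cases h3 : PySem.Str.startswith (PySem.Str.strip l) "- [ ]" = true
      · simp only [pvBStep, if_pos h3]
      · simp only [pvBStep, if_neg h3]

-- ===== VERDICT (by name: the statement is the Claim_ definition above) =====
theorem extract_open_tasks_py_spec : Claim_equal_extract_open_tasks_py := by
  intro tasks_md _
  unfold Spec_extract_open_tasks_py extract_open_tasks_py extract_open_tasks_py_alt
  rw [pvSections_fold_eq_aLoop]
  rfl
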